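-- pv_equiv track=rewrite | github.com/bnbbbb/Algotithm | 백준/Silver/1316. 그룹 단어 체커/그룹 단어 체커.py | group_word
-- ===== SOURCE A (Python) =====
-- def group_word(word):
--     count = 0
--     is_group_word = True
--     visited = set()
--
--     for i in range(len(word)):
--         if word[i] in visited and word[i] != word[i-1]:
--             return 0
--         visited.add(word[i])
--     if is_group_word:
--         count +=1
--     return count
-- ===== SOURCE B (Python) =====
-- def group_word(word):
--     keys = []
--     prev = None
--     for ch in word:
--         if ch != prev:
--             keys.append(ch)
--             prev = ch
--     return 1 if len(keys) == len(set(keys)) else 0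
-- ===== Notes on version B (the rewrite author's own statement) =====
-- stated objective: alternative
-- what changed: A's single-pass index scan with a visited set and early return is replaced by a two-phase decomposition: run-length-compress the word into its sequence of keys, then return 1 iff the compressed keys are pairwise distinct (len(keys) == len(set(keys))).
import Mathlib
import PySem

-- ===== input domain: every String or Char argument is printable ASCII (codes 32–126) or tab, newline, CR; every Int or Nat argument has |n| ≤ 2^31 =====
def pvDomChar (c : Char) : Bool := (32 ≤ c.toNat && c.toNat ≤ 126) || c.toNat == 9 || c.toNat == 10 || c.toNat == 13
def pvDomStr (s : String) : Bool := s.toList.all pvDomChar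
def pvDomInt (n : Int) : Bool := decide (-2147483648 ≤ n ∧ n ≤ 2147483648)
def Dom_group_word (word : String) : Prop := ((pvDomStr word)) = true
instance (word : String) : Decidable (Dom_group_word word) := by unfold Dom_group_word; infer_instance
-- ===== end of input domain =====

-- B replaces A's single-pass early-exit scan over indices (with a visited set and a
-- word[i-1] comparison) by a two-phase decomposition: first run-length-compress the word,
-- then return 1 iff the compressed keys are pairwise distinct (len == len of set).
-- Objective: simpler/alternative decomposition, same cost; return value only (no mutation).

-- ===== PORT A =====
-- for i in range(len(word)): early return 0; visited is a Python set.
-- word[i-1]: Python negative-index semantics via pyGet?; the index is always in range here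
-- (the list is nonempty when the loop body runs), so the `.getD c` default is never the result.
def pvALoop (cs : List Char) (visited : PySem.Set Char) (i : Nat) : Int :=
  if h : i < cs.length then
    let c := cs[i]
    if visited.contains c && !((PySem.List.pyGet? cs ((i : Int) - 1)).getD c == c) then 0
    else pvALoop cs (visited.add c) (i + 1)
  else 1  -- loop done: count = 0; is_group_word still True → count += 1; return count
termination_by cs.length - i

def group_word (word : String) : Int :=
  pvALoop word.toList PySem.Set.empty 0

-- ===== PORT B =====
-- the for-loop of Source B: state = (keys, prev); append ch when ch != prev
def pvBStep (st : List Char × Option Char) (c : Char) : List Char × Option Char :=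
  if (some c) ≠ st.2 then (st.1 ++ [c], some c) else st

def group_word_alt (word : String) : Int :=
  let keys := (word.toList.foldl pvBStep ([], none)).1
  if keys.length = (PySem.Set.ofList keys).length then 1 else 0

-- ===== PRECONDITION & SPEC =====
def Spec_group_word (word : String) (out : Int) : Prop := out = group_word_alt word
instance (word : String) (out : Int) : Decidable (Spec_group_word word out) := by unfold Spec_group_word; infer_instance

-- ===== CLAIM (what is proved, stated in full; the proofs are below) =====
def Claim_equal_group_word : Prop := ∀ (word : String), Dom_group_word word → Spec_group_word word (group_word word)

-- ===== LEMMAS AND PROOFS =====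

-- run-length compression, structurally (proof-side characterisation of Source B's loop)
def pvCompAux (p : Char) : List Char → List Char
  | [] => []
  | c :: rest => if c = p then pvCompAux p rest else c :: pvCompAux c rest

-- structural form of A's loop: prev char, remaining suffix
def pvG (p : Char) (rest : List Char) (v : PySem.Set Char) : Int :=
  match rest with
  | [] => 1
  | c :: rest' => if c ∈ v ∧ c ≠ p then 0 else pvG c rest' (v.add c)

lemma pvBStep_foldl (rest : List Char) : ∀ (ks : List Char) (p : Char),
    (rest.foldl pvBStep (ks, some p)).1 = ks ++ pvCompAux p rest := by
  induction rest with
  | nil => simp [pvCompAux]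
  | cons c rest ih =>
    intro ks p
    by_cases hc : c = p
    · subst hc; simp [pvBStep, pvCompAux, ih]
    · simp [pvBStep, pvCompAux, hc, ih]

lemma ofList_sublist (xs : List Char) : (PySem.Set.ofList xs).Sublist xs := by
  induction xs with
  | nil => simp [PySem.Set.ofList_nil]
  | cons x xs ih =>
    rw [PySem.Set.ofList_cons]
    exact List.Sublist.cons₂ x (List.Sublist.trans List.filter_sublist ih)

lemma len_ofList_iff (xs : List Char) :
    (xs.length = (PySem.Set.ofList xs).length) ↔ xs.Nodup := by
  constructor
  · intro h
    have := (ofList_sublist xs).eq_of_length h.symm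
    rw [← this]
    exact PySem.Set.nodup_ofList xs
  · intro h; rw [PySem.Set.ofList_eq_self_of_nodup xs h]

-- the invariant linking A's scan to the compressed keys
lemma pvG_char (rest : List Char) : ∀ (p : Char) (v : PySem.Set Char), p ∈ v →
    pvG p rest v =
      if (pvCompAux p rest).Nodup ∧ (∀ x ∈ pvCompAux p rest, x ∉ v) then 1 else 0 := by
  induction rest with
  | nil => intro p v _; simp [pvG, pvCompAux]
  | cons c rest ih =>
    intro p v hp
    by_cases hc : c = p
    · subst hc
      have hcv : c ∈ v := hp
      rw [show pvG c (c :: rest) v = pvG c rest (v.add c) by simp [pvG]]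
      rw [PySem.Set.add_of_mem hcv]
      simp [pvCompAux, ih c v hcv]
    · by_cases hv : c ∈ v
      · have h0 : pvG p (c :: rest) v = 0 := by
          simp [pvG, hv, hc]
        rw [h0, pvCompAux, if_neg hc, if_neg]
        rintro ⟨-, hall⟩
        exact hall c (by simp) hv
      · rw [show pvG p (c :: rest) v = pvG c rest (v.add c) by simp [pvG, hv]]
        rw [ih c (v.add c) (by simp [PySem.Set.mem_add])]
        rw [pvCompAux, if_neg hc]
        apply if_congr _ rfl rfl
        constructor
        · rintro ⟨hnd, hall⟩
          have hnotc : c ∉ pvCompAux c rest := fun hmem =>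
            hall c hmem ((PySem.Set.mem_add v c c).mpr (Or.inr rfl))
          refine ⟨List.nodup_cons.mpr ⟨hnotc, hnd⟩, ?_⟩
          intro x hx
          rcases List.mem_cons.mp hx with rfl | hx
          · exact hv
          · exact fun hxv => (hall x hx) ((PySem.Set.mem_add v c x).mpr (Or.inl hxv))
        · rintro ⟨hnd, hall⟩
          have hnotc : c ∉ pvCompAux c rest := (List.nodup_cons.mp hnd).1
          refine ⟨(List.nodup_cons.mp hnd).2, ?_⟩
          intro x hx hxv
          rcases (PySem.Set.mem_add v c x).mp hxv with hxv | rfl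
          · exact hall x (List.mem_cons.mpr (Or.inr hx)) hxv
          · exact hnotc hx

-- A's index loop, from index n+1 on, is the structural scan with prev = cs[n]
lemma pvALoop_eq_pvG (cs : List Char) (k : Nat) : ∀ (n : Nat) (v : PySem.Set Char)
    (h : n < cs.length), cs.length - (n + 1) = k →
    pvALoop cs v (n + 1) = pvG cs[n] (cs.drop (n + 1)) v := by
  induction k with
  | zero =>
    intro n v h hk
    have hlen : cs.length ≤ n + 1 := by omega
    rw [pvALoop, dif_neg (by omega)]
    rw [List.drop_eq_nil_of_le hlen]
    rfl
  | succ k ih =>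
    intro n v h hk
    have h1 : n + 1 < cs.length := by omega
    rw [pvALoop, dif_pos h1]
    rw [List.drop_eq_getElem_cons h1]
    rw [pvG]
    have hprev : PySem.List.pyGet? cs ((↑(n + 1) : Int) - 1) = some cs[n] := by
      have : ((↑(n + 1) : Int) - 1) = (↑n : Int) := by push_cast; ring
      rw [this, PySem.List.pyGet?_natCast, List.getElem?_eq_getElem h]
    simp only [hprev, Option.getD_some]
    have hcont : v.contains cs[n + 1] = decide (cs[n + 1] ∈ v) := by
      by_cases hm : cs[n + 1] ∈ v
      · rw [(PySem.Set.contains_iff v _).mpr hm]; simp [hm]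
      · rw [Bool.eq_false_iff.mpr (fun ht => hm ((PySem.Set.contains_iff v _).mp ht))]
        simp [hm]
    by_cases hcond : cs[n + 1] ∈ v ∧ cs[n + 1] ≠ cs[n]
    · rw [if_pos hcond, if_pos]
      simp [hcond.1, beq_eq_false_iff_ne.mpr (Ne.symm hcond.2)]
    · rw [if_neg hcond, if_neg]
      · exact ih (n + 1) (v.add cs[n + 1]) h1 (by omega)
      · rcases not_and_or.mp hcond with hc | hc
        · simp [hc]
        · have : cs[n + 1] = cs[n] := not_not.mp hc
          simp [this]

-- ===== VERDICT (by name: the statement is the Claim_ definition above) =====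
theorem group_word_spec : Claim_equal_group_word := by
  intro word _
  unfold Spec_group_word group_word group_word_alt
  cases hcs : word.toList with
  | nil =>
    rw [pvALoop]
    simp [PySem.Set.ofList]
  | cons c rest =>
    -- A side: first iteration never fires (visited empty), then the structural scan
    have hlen : 0 < (c :: rest).length := by simp
    rw [show pvALoop (c :: rest) PySem.Set.empty 0 =
          pvALoop (c :: rest) (PySem.Set.empty.add c) 1 by
        rw [pvALoop, dif_pos hlen]
        simp [PySem.Set.empty, PySem.Set.contains]]
    rw [pvALoop_eq_pvG (c :: rest) ((c :: rest).length - 1) 0 _ hlen rfl]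
    have hadd : (PySem.Set.empty.add c : PySem.Set Char) = [c] := rfl
    simp only [List.getElem_cons_zero, List.drop_succ_cons, List.drop_zero, hadd]
    rw [pvG_char rest c [c] (by simp)]
    -- B side
    have hfold : ((c :: rest).foldl pvBStep ([], none)).1 = c :: pvCompAux c rest := by
      rw [List.foldl_cons, show pvBStep ([], none) c = ([c], some c) by simp [pvBStep]]
      exact pvBStep_foldl rest [c] c
    rw [hfold]
    rw [show (if (c :: pvCompAux c rest).length = (PySem.Set.ofList (c :: pvCompAux c rest)).length then (1:Int) else 0)
          = if (c :: pvCompAux c rest).Nodup then 1 else 0 from if_congr (len_ofList_iff _) rfl rfl]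
    apply (if_congr _ rfl rfl).symm
    rw [List.nodup_cons]
    constructor
    · rintro ⟨hnotc, hnd⟩
      exact ⟨hnd, fun x hx hxv => hnotc (by rcases List.mem_singleton.mp hxv with rfl; exact hx)⟩
    · rintro ⟨hnd, hall⟩
      exact ⟨fun hmem => hall c hmem (by simp), hnd⟩
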